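-- pv_equiv track=rewrite | github.com/hdsung98/ps | 투포인터,이진탐색,정렬,누적합/네이버 코테2.py | find_largest_group
-- ===== SOURCE A (Python) =====
-- def find_largest_group(A, B, delays):
--     n, m = len(delays), len(delays[0])  # 멤버 수 n, 서버 수 m
--     max_group_size = 0
--     server_with_max_group = -1
--
--     for server in range(m):
--         # 현재 서버에 대한 딜레이 값만 저장(해당 열(서버)의 모든 멤버에 대한 딜레이 값 수집)
--         server_delays = [delay[server] for delay in delays]
--         # 딜레이 값에 따라 오름차순 정렬
--         server_delays.sort()
--
--         start, end = 0, 0  # 투 포인터 초기화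
--
--         while end < n:  # 그룹 사이즈를 더 늘릴 수 없을 때 종료(시작포인터를 여기서 더 옮겨 봤자 그룹사이즈는 오히려 준다)
--             min_delay = server_delays[start]
--             max_delay = server_delays[end]
--
--             if max_delay <= min_delay * A and max_delay - min_delay <= B * 1000:
--                 # 형평성 규칙을 만족하면, 그룹 크기 증가
--                 current_group_size = end - start + 1
--                 if current_group_size > max_group_size:
--                     max_group_size = current_group_size
--                     server_with_max_group = server
--                 end += 1
--             else:
--                 # 형평성 규칙을 만족하지 않으면, 시작 포인터 이동
--                 start += 1
--
--     return [server_with_max_group, max_group_size]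
-- ===== SOURCE B (Python) =====
-- import bisect
--
-- def find_largest_group(A, B, delays):
--     n, m = len(delays), len(delays[0])
--     max_group_size = 0
--     server_with_max_group = -1
--     for server in range(m):
--         sd = sorted(delay[server] for delay in delays)
--         best = 0
--         for start in range(n):
--             threshold = min(sd[start] * A, sd[start] + B * 1000)
--             best = max(best, bisect.bisect_right(sd, threshold) - start)
--         if best > max_group_size:
--             max_group_size = best
--             server_with_max_group = server
--     return [server_with_max_group, max_group_size]
-- ===== Notes on version B (the rewrite author's own statement) =====
-- stated objective: alternative
-- what changed: A's stateful two-pointer sliding window over each sorted server column is replaced by a per-start closed-form window: for every start index, bisect_right on the sorted column with threshold min(sd[start]*A, sd[start]+B*1000) gives the window end directly, and the per-server maximum is folded with the same strict-greater first-server tie-break.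
-- outside the precondition, e.g. on find_largest_group(0, 0, [[0]]): A returns [0, 1], B returns [0, 1]
import Mathlib
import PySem

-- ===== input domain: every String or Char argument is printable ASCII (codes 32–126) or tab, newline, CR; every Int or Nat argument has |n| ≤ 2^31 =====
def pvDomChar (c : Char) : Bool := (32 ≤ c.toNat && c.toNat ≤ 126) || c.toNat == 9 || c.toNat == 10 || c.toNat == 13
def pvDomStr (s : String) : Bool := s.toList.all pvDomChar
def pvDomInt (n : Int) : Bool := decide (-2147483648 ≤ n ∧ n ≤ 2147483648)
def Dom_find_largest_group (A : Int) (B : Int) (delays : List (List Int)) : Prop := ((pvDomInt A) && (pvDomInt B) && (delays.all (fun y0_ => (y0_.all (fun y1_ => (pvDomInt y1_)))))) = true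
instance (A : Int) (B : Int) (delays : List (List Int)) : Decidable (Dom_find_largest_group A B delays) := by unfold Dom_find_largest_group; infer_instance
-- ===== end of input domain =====

-- B replaces A's two-pointer sliding window by a per-start bisect_right count on the sorted
-- column (objective: alternative, same asymptotic cost); equivalence is proved on the natural
-- domain Pre_ below.

-- ===== PORT A =====
-- the inner `while end < n` two-pointer loop of A; state (start, e, mx, srv)
def pvALoop (A B : Int) (server : Int) (s : List Int) (start e : Nat) (mx srv : Int) : Int × Int :=
  if he : e < s.length then
    match hs : s[start]? with
    | some mn =>
      if s[e]'he ≤ mn * A ∧ s[e]'he - mn ≤ B * 1000 then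
        -- fairness rule satisfied: maybe record, move end
        if (e : Int) - (start : Int) + 1 > mx then
          pvALoop A B server s start (e + 1) ((e : Int) - (start : Int) + 1) server
        else
          pvALoop A B server s start (e + 1) mx srv
      else
        -- rule violated: move start
        pvALoop A B server s (start + 1) e mx srv
    | none => (mx, srv)  -- Python: IndexError `server_delays[start]`; outside Pre_
  else (mx, srv)
termination_by (s.length - e) + (s.length - start)
decreasing_by
  · omega
  · omega
  · have : start < s.length := by
      have := List.getElem?_eq_some_iff.mp hs
      exact this.1
    omega

def find_largest_group (A : Int) (B : Int) (delays : List (List Int)) : List Int :=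
  match delays with
  | [] => []  -- Python: IndexError `delays[0]`; outside Pre_
  | d0 :: _ =>
    let m := d0.length
    let st := (List.range m).foldl (fun (st : Int × Int) (server : Nat) =>
      -- `row.getD server 0`: Python `delay[server]` raises on a short row; outside Pre_
      let sd := PySem.List.sorted (delays.map (fun row => row.getD server 0)) (fun v => v)
      pvALoop A B (server : Int) sd 0 0 st.1 st.2) (0, -1)
    [st.2, st.1]

-- ===== PORT B =====
def find_largest_group_alt (A : Int) (B : Int) (delays : List (List Int)) : List Int :=
  match delays with
  | [] => []  -- Python: IndexError `delays[0]`; outside Pre_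
  | d0 :: _ =>
    let n := delays.length
    let m := d0.length
    let st := (List.range m).foldl (fun (st : Int × Int) (server : Nat) =>
      let sd := PySem.List.sorted (delays.map (fun row => row.getD server 0)) (fun v => v)
      let best := (List.range n).foldl (fun (best : Int) start =>
        let threshold := min (sd.getD start 0 * A) (sd.getD start 0 + B * 1000)
        max best ((PySem.List.bisectRight sd threshold : Int) - (start : Int))) 0
      if best > st.1 then (best, (server : Int)) else st) (0, -1)
    [st.2, st.1]

-- ===== PRECONDITION & SPEC =====
-- Pre_ restricts to the problem's natural domain (nonempty delays and either an empty first row,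
-- where the server loop never runs, or: every row at least as long as the first, fairness factor
-- A ≥ 1, budget B ≥ 0, and unless A = 1 a nonnegative delay in every used column); outside it A's two-pointer typically runs
-- `start` past the end of the sorted column (IndexError), though on some corner inputs
-- (e.g. A ≤ 0 with nonpositive delays) A still returns and B agrees there.
def Pre_find_largest_group (A : Int) (B : Int) (delays : List (List Int)) : Prop :=
  delays ≠ [] ∧
  (delays.headI.length = 0 ∨
    (1 ≤ A ∧ 0 ≤ B ∧
     (∀ row ∈ delays, delays.headI.length ≤ row.length) ∧
     (A = 1 ∨ ∀ j, j < delays.headI.length → ∃ row ∈ delays, 0 ≤ row.getD j 0)))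
instance (A : Int) (B : Int) (delays : List (List Int)) : Decidable (Pre_find_largest_group A B delays) := by unfold Pre_find_largest_group; infer_instance

def pvWitness_find_largest_group : Int × Int × List (List Int) := (2, 1, [[3, 10], [4, 20]])

def Spec_find_largest_group (A : Int) (B : Int) (delays : List (List Int)) (out : List Int) : Prop := out = find_largest_group_alt A B delays
instance (A : Int) (B : Int) (delays : List (List Int)) (out : List Int) : Decidable (Spec_find_largest_group A B delays out) := by unfold Spec_find_largest_group; infer_instance

-- ===== CLAIM (what is proved, stated in full; the proofs are below) =====
def Claim_equal_find_largest_group : Prop := ∀ (A : Int) (B : Int) (delays : List (List Int)), Dom_find_largest_group A B delays → Pre_find_largest_group A B delays → Spec_find_largest_group A B delays (find_largest_group A B delays)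

-- ===== LEMMAS AND PROOFS =====

-- threshold, bisect index and window size of column s at start t
def pvThr (A B v : Int) : Int := min (v * A) (v + B * 1000)
def pvIdx (A B : Int) (s : List Int) (t : Nat) : Nat := PySem.List.bisectRight s (pvThr A B (s.getD t 0))
def pvG (A B : Int) (s : List Int) (t : Nat) : Int := (pvIdx A B s t : Int) - (t : Int)

-- maximum of g over [start, n)
def pvMsuf (g : Nat → Int) (n start : Nat) : Int :=
  if start + 1 < n then max (g start) (pvMsuf g n (start + 1)) else g start
termination_by n - start

lemma pvMsuf_self (g : Nat → Int) (n start : Nat) : g start ≤ pvMsuf g n start := by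
  rw [pvMsuf]; split <;> simp

lemma pvMsuf_step (g : Nat → Int) (n start : Nat) (h : start + 1 < n) :
    pvMsuf g n start = max (g start) (pvMsuf g n (start + 1)) := by
  rw [pvMsuf, if_pos h]

lemma pvMsuf_le (g : Nat → Int) (n : Nat) (c : Int) :
    ∀ start, start < n → (∀ t, start ≤ t → t < n → g t ≤ c) → pvMsuf g n start ≤ c := by
  suffices H : ∀ k start, n - start ≤ k → start < n →
      (∀ t, start ≤ t → t < n → g t ≤ c) → pvMsuf g n start ≤ c by
    intro start h1 h2
    exact H n start (by omega) h1 h2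
  intro k
  induction k with
  | zero => intro start hk hsn _; omega
  | succ k ih =>
    intro start hk hsn hall
    rw [pvMsuf]
    split
    · exact max_le (hall start le_rfl hsn)
        (ih (start + 1) (by omega) (by omega) (fun t h1 h2 => hall t (by omega) h2))
    · exact hall start le_rfl hsn


lemma pvGetD_mono (s : List Int) (hp : s.Pairwise (· ≤ ·)) {i j : Nat}
    (hij : i ≤ j) (hj : j < s.length) : s.getD i 0 ≤ s.getD j 0 := by
  have hi : i < s.length := lt_of_le_of_lt hij hj
  rw [List.getD_eq_getElem s 0 hi, List.getD_eq_getElem s 0 hj]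
  rcases Nat.lt_or_ge i j with h | h
  · exact List.pairwise_iff_getElem.mp hp i j hi hj h
  · have : i = j := le_antisymm hij h
    subst this; exact le_refl _

lemma pvIdx_le (A B : Int) (s : List Int) (hp : s.Pairwise (· ≤ ·)) (t : Nat) :
    pvIdx A B s t ≤ s.length :=
  (PySem.List.bisectRight_spec s _ hp).1

lemma pvSelf_le_thr (A B v : Int) (HA : 1 ≤ A) (HB : 0 ≤ B) (hv : 0 ≤ v ∨ A = 1) :
    v ≤ pvThr A B v := by
  unfold pvThr
  refine le_min ?_ (by omega)
  rcases hv with hv | hv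
  · nlinarith
  · simp [hv]

lemma pvLt_idx_iff (A B : Int) (s : List Int) (hp : s.Pairwise (· ≤ ·))
    (t e : Nat) (he : e < s.length) :
    e < pvIdx A B s t ↔ s[e]'he ≤ pvThr A B (s.getD t 0) := by
  unfold pvIdx
  obtain ⟨h1, h2, h3⟩ := PySem.List.bisectRight_spec s (pvThr A B (s.getD t 0)) hp
  constructor
  · intro h; exact h2 e he h
  · intro h
    by_contra hc
    have := h3 e he (by omega)
    omega

lemma pvIdx_self_lt (A B : Int) (s : List Int) (HA : 1 ≤ A) (HB : 0 ≤ B)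
    (hp : s.Pairwise (· ≤ ·))
    (t : Nat) (ht : t < s.length) (hgt : 0 ≤ s.getD t 0 ∨ A = 1) : t < pvIdx A B s t := by
  rw [pvLt_idx_iff A B s hp t t ht]
  have := pvSelf_le_thr A B (s.getD t 0) HA HB hgt
  rw [← List.getD_eq_getElem s 0 ht]
  exact this

lemma pvIdx_le_self (A B : Int) (s : List Int) (HA : 1 ≤ A)
    (hp : s.Pairwise (· ≤ ·)) (t : Nat) (ht : t < s.length)
    (hbad : ¬ (0 ≤ s.getD t 0 ∨ A = 1)) : pvIdx A B s t ≤ t := by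
  by_contra hc
  rw [Nat.not_le] at hc
  have hle := (pvLt_idx_iff A B s hp t t ht).mp hc
  rw [← List.getD_eq_getElem s 0 ht] at hle
  unfold pvThr at hle
  rw [le_min_iff] at hle
  rcases not_or.mp hbad with ⟨h1, h2⟩
  rw [not_le] at h1
  have h3 : s.getD t 0 * (A - 2) ≤ 0 :=
    mul_nonpos_iff.mpr (Or.inr ⟨le_of_lt h1, by omega⟩)
  have h4 : s.getD t 0 * A = 2 * s.getD t 0 + s.getD t 0 * (A - 2) := by ring
  have h5 := hle.1
  omega

lemma pvIdx_mono (A B : Int) (s : List Int) (HA : 1 ≤ A)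
    (hp : s.Pairwise (· ≤ ·)) {t t' : Nat} (htt : t ≤ t') (ht' : t' < s.length) :
    pvIdx A B s t ≤ pvIdx A B s t' := by
  have hv : s.getD t 0 ≤ s.getD t' 0 := pvGetD_mono s hp htt ht'
  have hthr : pvThr A B (s.getD t 0) ≤ pvThr A B (s.getD t' 0) := by
    unfold pvThr
    have h1 : s.getD t 0 * A ≤ s.getD t' 0 * A :=
      mul_le_mul_of_nonneg_right hv (by omega)
    exact min_le_min h1 (by omega)
  by_contra hc
  rw [Nat.not_le] at hc
  have hle : pvIdx A B s t ≤ s.length := pvIdx_le A B s hp t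
  have he : pvIdx A B s t' < s.length := lt_of_lt_of_le hc hle
  have hx : s[pvIdx A B s t']'he ≤ pvThr A B (s.getD t 0) :=
    (pvLt_idx_iff A B s hp t _ he).mp hc
  obtain ⟨_, _, h3⟩ := PySem.List.bisectRight_spec s (pvThr A B (s.getD t' 0)) hp
  have := h3 _ he (le_refl _)
  omega

lemma pvALoop_spec (A B server : Int) (s : List Int) (HA : 1 ≤ A) (HB : 0 ≤ B)
    (hp : s.Pairwise (· ≤ ·)) :
    ∀ k start e (mx srv : Int), (s.length - e) + (s.length - start) ≤ k →
      start < s.length → (0 ≤ s.getD start 0 ∨ A = 1) →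
      start ≤ e → e ≤ pvIdx A B s start → (e : Int) - (start : Int) ≤ mx →
      pvALoop A B server s start e mx srv =
        (max mx (pvMsuf (pvG A B s) s.length start),
         if mx < pvMsuf (pvG A B s) s.length start then server else srv) := by
  intro k
  induction k with
  | zero => intro start e mx srv hk hstart _ _ _ _; omega
  | succ k ih =>
    intro start e mx srv hk hstart hgs hse hidx hmx
    by_cases he : e < s.length
    · rw [pvALoop, dif_pos he]
      have hget : s[start]? = some (s[start]'hstart) := List.getElem?_eq_getElem hstart
      split
      case _ mn hmn =>
        rw [hget] at hmn
        injection hmn with hmn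
        subst hmn
        have hgd : s.getD start 0 = s[start]'hstart := List.getD_eq_getElem s 0 hstart
        by_cases hcond : s[e]'he ≤ (s[start]'hstart) * A ∧ s[e]'he - s[start]'hstart ≤ B * 1000
        · rw [if_pos hcond]
          have hlt : e < pvIdx A B s start := by
            rw [pvLt_idx_iff A B s hp start e he, hgd]
            unfold pvThr
            exact le_min hcond.1 (by omega)
          by_cases hcur : (e : Int) - (start : Int) + 1 > mx
          · rw [if_pos hcur]
            have hrec := ih start (e + 1) ((e : Int) - (start : Int) + 1) server
              (by omega) hstart hgs (by omega) (by omega) (by push_cast; omega)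
            rw [hrec]
            have hg : (e : Int) - (start : Int) + 1 ≤ pvG A B s start := by
              unfold pvG; omega
            have hM := pvMsuf_self (pvG A B s) s.length start
            have hMx : max ((e : Int) - (start : Int) + 1) (pvMsuf (pvG A B s) s.length start)
                = max mx (pvMsuf (pvG A B s) s.length start) := by omega
            have h1 : mx < pvMsuf (pvG A B s) s.length start := by omega
            simp only [hMx, ite_self, if_pos h1]
          · rw [if_neg hcur]
            exact ih start (e + 1) mx srv (by omega) hstart hgs (by omega) (by omega)
              (by push_cast; omega)
        · rw [if_neg hcond]
          have hnlt : ¬ e < pvIdx A B s start := by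
            rw [pvLt_idx_iff A B s hp start e he, hgd]
            unfold pvThr
            intro h
            rw [le_min_iff] at h
            exact hcond ⟨h.1, by omega⟩
          have heq : e = pvIdx A B s start := by omega
          have hself : start < pvIdx A B s start :=
            pvIdx_self_lt A B s HA HB hp start hstart hgs
          have hs1 : start + 1 < s.length := by omega
          have hgs1 : 0 ≤ s.getD (start + 1) 0 ∨ A = 1 := by
            rcases hgs with h | h
            · exact Or.inl (le_trans h (pvGetD_mono s hp (by omega) hs1))
            · exact Or.inr h
          have hrec := ih (start + 1) e mx srv (by omega) hs1 hgs1 (by omega)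
            (by
              have := pvIdx_mono A B s HA hp (by omega : start ≤ start + 1) hs1
              omega)
            (by push_cast at hmx ⊢; omega)
          rw [hrec]
          have hstep := pvMsuf_step (pvG A B s) s.length start hs1
          have hgle : pvG A B s start ≤ mx := by
            unfold pvG; omega
          have h1 : max mx (pvMsuf (pvG A B s) s.length (start + 1))
              = max mx (pvMsuf (pvG A B s) s.length start) := by rw [hstep]; omega
          rw [h1]
          by_cases hc : mx < pvMsuf (pvG A B s) s.length (start + 1)
          · rw [if_pos hc, if_pos (by rw [hstep]; omega)]
          · rw [if_neg hc, if_neg (by rw [hstep]; omega)]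
      case _ hmn =>
        rw [hget] at hmn
        exact absurd hmn (by simp)
    · rw [pvALoop, dif_neg he]
      have hlen : e = s.length := by
        have := pvIdx_le A B s hp start
        omega
      have hMle : pvMsuf (pvG A B s) s.length start ≤ mx := by
        refine pvMsuf_le (pvG A B s) s.length mx start hstart ?_
        intro t hst htn
        have := pvIdx_le A B s hp t
        unfold pvG
        have h1 : (pvIdx A B s t : Int) ≤ (s.length : Int) := by exact_mod_cast this
        omega
      rw [max_eq_left hMle, if_neg (by omega)]

-- the two-pointer loop from a catch-up state (e ≤ p): over the strictly-negative prefix the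
-- start pointer advances without recording, and the end pointer catches up without recording
lemma pvALoopC (A B server : Int) (s : List Int) (HA : 1 ≤ A) (HB : 0 ≤ B)
    (hp : s.Pairwise (· ≤ ·)) (hgl : 0 ≤ s.getD (s.length - 1) 0 ∨ A = 1) :
    ∀ k p e (mx srv : Int), (s.length - e) + (s.length - p) ≤ k →
      e ≤ p → p < s.length → 0 ≤ mx →
      pvALoop A B server s p e mx srv =
        (max mx (pvMsuf (pvG A B s) s.length p),
         if mx < pvMsuf (pvG A B s) s.length p then server else srv) := by
  intro k
  induction k with
  | zero => intro p e mx srv hk hep hpn _; omega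
  | succ k ih =>
    intro p e mx srv hk hep hpn hmx
    by_cases hgood : 0 ≤ s.getD p 0 ∨ A = 1
    · rcases Nat.eq_or_lt_of_le hep with heq | hlt
      · rw [heq]
        exact pvALoop_spec A B server s HA HB hp (2 * s.length) p p mx srv (by omega) hpn hgood
          (le_refl p) (le_of_lt (pvIdx_self_lt A B s HA HB hp p hpn hgood)) (by omega)
      · have he : e < s.length := by omega
        rw [pvALoop, dif_pos he]
        have hget : s[p]? = some (s[p]'hpn) := List.getElem?_eq_getElem hpn
        split
        case _ mn hmn =>
          rw [hget] at hmn; injection hmn with hmn; subst hmn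
          have hvp : s.getD p 0 ≤ pvThr A B (s.getD p 0) := pvSelf_le_thr A B _ HA HB hgood
          have hev : s.getD e 0 ≤ s.getD p 0 := pvGetD_mono s hp (by omega) hpn
          have hcond : s[e]'he ≤ (s[p]'hpn) * A ∧ s[e]'he - s[p]'hpn ≤ B * 1000 := by
            unfold pvThr at hvp
            rw [le_min_iff] at hvp
            rw [← List.getD_eq_getElem s 0 he, ← List.getD_eq_getElem s 0 hpn]
            constructor <;> omega
          rw [if_pos hcond, if_neg (by omega : ¬ ((e : Int) - (p : Int) + 1 > mx))]
          exact ih p (e + 1) mx srv (by omega) (by omega) hpn hmx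
        case _ hmn =>
          rw [hget] at hmn
          exact absurd hmn (by simp)
    · have hpn1 : p + 1 < s.length := by
        rcases Nat.eq_or_lt_of_le (Nat.succ_le_of_lt hpn) with h | h
        · exfalso
          apply hgood
          have hpe : p = s.length - 1 := by omega
          rw [← hpe] at hgl
          exact hgl
        · exact h
      have hidxp : pvIdx A B s p ≤ p := pvIdx_le_self A B s HA hp p hpn hgood
      have he : e < s.length := by omega
      rw [pvALoop, dif_pos he]
      have hget : s[p]? = some (s[p]'hpn) := List.getElem?_eq_getElem hpn
      split
      case _ mn hmn =>
        rw [hget] at hmn; injection hmn with hmn; subst hmn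
        have hgd : s.getD p 0 = s[p]'hpn := List.getD_eq_getElem s 0 hpn
        by_cases hcond : s[e]'he ≤ (s[p]'hpn) * A ∧ s[e]'he - s[p]'hpn ≤ B * 1000
        · rw [if_pos hcond]
          have helt : e < pvIdx A B s p := by
            rw [pvLt_idx_iff A B s hp p e he, hgd]
            unfold pvThr
            exact le_min hcond.1 (by omega)
          rw [if_neg (by omega : ¬ ((e : Int) - (p : Int) + 1 > mx))]
          exact ih p (e + 1) mx srv (by omega) (by omega) hpn hmx
        · rw [if_neg hcond]
          have hrec := ih (p + 1) e mx srv (by omega) (by omega) hpn1 hmx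
          rw [hrec]
          have hstep := pvMsuf_step (pvG A B s) s.length p hpn1
          have hgle : pvG A B s p ≤ mx := by unfold pvG; omega
          have h1 : max mx (pvMsuf (pvG A B s) s.length (p + 1))
              = max mx (pvMsuf (pvG A B s) s.length p) := by rw [hstep]; omega
          rw [h1]
          by_cases hc : mx < pvMsuf (pvG A B s) s.length (p + 1)
          · rw [if_pos hc, if_pos (by rw [hstep]; omega)]
          · rw [if_neg hc, if_neg (by rw [hstep]; omega)]
      case _ hmn =>
        rw [hget] at hmn
        exact absurd hmn (by simp)

lemma pvBfold (g : Nat → Int) :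
    ∀ l start (b : Int), 0 < l →
      (List.range' start l).foldl (fun acc t => max acc (g t)) b = max b (pvMsuf g (start + l) start) := by
  intro l
  induction l with
  | zero => intro start b h; omega
  | succ l ihl =>
    intro start b _
    rcases Nat.eq_zero_or_pos l with hl | hl
    · subst hl
      simp [List.range', pvMsuf]
    · rw [List.range'_succ, List.foldl_cons, ihl (start + 1) (max b (g start)) hl]
      have hstep : pvMsuf g (start + (l + 1)) start
          = max (g start) (pvMsuf g (start + (l + 1)) (start + 1)) :=
        pvMsuf_step g (start + (l + 1)) start (by omega)
      have harg : start + 1 + l = start + (l + 1) := by omega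
      rw [harg, hstep]
      omega

lemma pvFoldl_eq_inv {α : Type} (l : List α) (f g : Int × Int → α → Int × Int)
    (P : Int × Int → Prop)
    (h : ∀ st x, x ∈ l → P st → f st x = g st x ∧ P (f st x)) :
    ∀ st, P st → l.foldl f st = l.foldl g st := by
  induction l with
  | nil => intro st _; rfl
  | cons a l ihl =>
    intro st hst
    obtain ⟨heq, hP⟩ := h st a (List.mem_cons_self) hst
    rw [List.foldl_cons, List.foldl_cons, heq]
    exact ihl (fun st x hx => h st x (List.mem_cons_of_mem a hx)) _ (heq ▸ hP)

-- the per-server step of A equals the per-server step of B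
lemma pvStep_eq (A B : Int) (delays : List (List Int)) (d0 : List Int) (rest : List (List Int))
    (hdel : delays = d0 :: rest)
    (HA : 1 ≤ A) (HB : 0 ≤ B)
    (server : Nat)
    (hcol : A = 1 ∨ ∃ row ∈ delays, 0 ≤ row.getD server 0)
    (sd : List Int)
    (hsd : sd = PySem.List.sorted (delays.map (fun row => row.getD server 0)) (fun v => v))
    (st : Int × Int) (hst : 0 ≤ st.1) :
    pvALoop A B (server : Int) sd 0 0 st.1 st.2
    = (if ((List.range delays.length).foldl (fun (best : Int) start =>
             max best ((PySem.List.bisectRight sd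
               (min (sd.getD start 0 * A) (sd.getD start 0 + B * 1000)) : Int) - (start : Int))) 0) > st.1
       then (((List.range delays.length).foldl (fun (best : Int) start =>
             max best ((PySem.List.bisectRight sd
               (min (sd.getD start 0 * A) (sd.getD start 0 + B * 1000)) : Int) - (start : Int))) 0), (server : Int))
       else st) := by
  have hp : sd.Pairwise (· ≤ ·) := by
    rw [hsd]
    have := PySem.List.sorted_pairwise (delays.map (fun row => row.getD server 0)) (fun v : Int => v)
    simpa using this
  have hslen : sd.length = delays.length := by
    rw [hsd, PySem.List.length_sorted, List.length_map]
  have hn : 0 < delays.length := by rw [hdel]; simp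
  have h0 : 0 < sd.length := by omega
  have hgl : 0 ≤ sd.getD (sd.length - 1) 0 ∨ A = 1 := by
    rcases hcol with h1 | ⟨row, hrow, hv0⟩
    · exact Or.inr h1
    · left
      have hmem : row.getD server 0 ∈ sd := by
        rw [hsd, PySem.List.mem_sorted]
        exact List.mem_map.mpr ⟨row, hrow, rfl⟩
      obtain ⟨i, hi, hieq⟩ := List.mem_iff_getElem.mp hmem
      have h2 : sd.getD i 0 ≤ sd.getD (sd.length - 1) 0 := pvGetD_mono sd hp (by omega) (by omega)
      rw [List.getD_eq_getElem sd 0 hi, hieq] at h2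
      omega
  -- A's side: run the loop from the initial catch-up state (0, 0)
  have hA := pvALoopC A B (server : Int) sd HA HB hp hgl
    (2 * sd.length) 0 0 st.1 st.2 (by omega) (le_refl 0) h0 hst
  -- B's side: the inner fold computes max 0 (pvMsuf (pvG A B sd) sd.length 0)
  have hB : ((List.range delays.length).foldl (fun (best : Int) start =>
        max best ((PySem.List.bisectRight sd
          (min (sd.getD start 0 * A) (sd.getD start 0 + B * 1000)) : Int) - (start : Int))) 0)
      = max 0 (pvMsuf (pvG A B sd) sd.length 0) := by
    have hbody : ((List.range delays.length).foldl (fun (best : Int) start =>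
          max best ((PySem.List.bisectRight sd
            (min (sd.getD start 0 * A) (sd.getD start 0 + B * 1000)) : Int) - (start : Int))) 0)
        = (List.range' 0 delays.length).foldl (fun acc t => max acc (pvG A B sd t)) 0 := by
      rw [List.range_eq_range']
      rfl
    rw [hbody, pvBfold (pvG A B sd) delays.length 0 0 hn, Nat.zero_add, hslen]
  rw [hA, hB]
  simp only [gt_iff_lt]
  by_cases hc : st.1 < pvMsuf (pvG A B sd) sd.length 0
  · rw [if_pos (show st.1 < max 0 (pvMsuf (pvG A B sd) sd.length 0) by omega), if_pos hc,
      max_eq_right (le_of_lt hc), max_eq_right (show (0:Int) ≤ pvMsuf (pvG A B sd) sd.length 0 by omega)]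
  · rw [if_neg (show ¬ st.1 < max 0 (pvMsuf (pvG A B sd) sd.length 0) by omega), if_neg hc,
      max_eq_left (show pvMsuf (pvG A B sd) sd.length 0 ≤ st.1 by omega), Prod.mk.eta]

-- ===== VERDICT (by name: the statement is the Claim_ definition above) =====
theorem find_largest_group_spec : Claim_equal_find_largest_group := by
  intro A B delays hdom hpre
  obtain ⟨hne, hrest⟩ := hpre
  unfold Spec_find_largest_group
  match hdel : delays with
  | [] => exact absurd rfl hne
  | d0 :: rest =>
    show find_largest_group A B (d0 :: rest) = find_largest_group_alt A B (d0 :: rest)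
    rcases hrest with hm0 | ⟨HA, HB, hlen, hcol⟩
    case _ =>
      -- first row empty: range m = [], both folds are the initial state
      have hm0' : d0.length = 0 := by simpa using hm0
      unfold find_largest_group find_largest_group_alt
      simp only [hm0', List.range_zero, List.foldl_nil]
    unfold find_largest_group find_largest_group_alt
    simp only []
    have hfold := pvFoldl_eq_inv (List.range d0.length)
      (fun (st : Int × Int) (server : Nat) =>
        pvALoop A B (server : Int)
          (PySem.List.sorted ((d0 :: rest).map (fun row => row.getD server 0)) (fun v => v))
          0 0 st.1 st.2)
      (fun (st : Int × Int) (server : Nat) =>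
        let sd := PySem.List.sorted ((d0 :: rest).map (fun row => row.getD server 0)) (fun v => v)
        let best := (List.range (d0 :: rest).length).foldl (fun (best : Int) start =>
          let threshold := min (sd.getD start 0 * A) (sd.getD start 0 + B * 1000)
          max best ((PySem.List.bisectRight sd threshold : Int) - (start : Int))) 0
        if best > st.1 then (best, (server : Int)) else st)
      (fun st => 0 ≤ st.1)
      (by
        intro st server hmem hst
        have hserver : server < d0.length := List.mem_range.mp hmem
        constructor
        · exact pvStep_eq A B (d0 :: rest) d0 rest rfl HA HB server
            (hcol.imp id (fun h => h server (by simpa using hserver))) _ rfl st hst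
        · show 0 ≤ (pvALoop A B (server : Int)
              (PySem.List.sorted ((d0 :: rest).map (fun row => row.getD server 0)) (fun v => v))
              0 0 st.1 st.2).1
          rw [pvStep_eq A B (d0 :: rest) d0 rest rfl HA HB server
            (hcol.imp id (fun h => h server (by simpa using hserver))) _ rfl st hst]
          split
          · next h => exact le_of_lt (lt_of_le_of_lt hst h)
          · exact hst)
      (0, -1) (by norm_num)
    rw [hfold]
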